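-- pv_equiv track=rewrite | github.com/kelvict/Sentiment-Analysis | Lbsa.py | your_dict_score
-- ===== SOURCE A (Python) =====
-- def your_dict_score(doc, your_senti_dict):
--     if len(doc) == 0:
--         return 0, 0, 0
--     pos_ct, neg_ct, score = 0, 0, 0
--     # print type(doc)
--     for term in doc:
--         if term in your_senti_dict:
--             score += your_senti_dict[term]
--             if your_senti_dict[term] > 0:
--                 pos_ct += 1
--             elif your_senti_dict[term] < 0:
--                 neg_ct += 1
--             else:
--                 pass
--     return pos_ct, neg_ct, score
-- ===== SOURCE B (Python) =====
-- def your_dict_score(doc, your_senti_dict):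
--     # Inverted traversal: count term frequencies in one pass over the document,
--     # then iterate over the sentiment dictionary's entries, weighting by count.
--     counts = {}
--     for t in doc:
--         counts[t] = counts.get(t, 0) + 1
--     pos_ct, neg_ct, score = 0, 0, 0
--     for term, v in your_senti_dict.items():
--         c = counts.get(term, 0)
--         score += c * v
--         if v > 0:
--             pos_ct += c
--         elif v < 0:
--             neg_ct += c
--     return pos_ct, neg_ct, score
-- ===== Notes on version B (the rewrite author's own statement) =====
-- stated objective: alternative
-- what changed: B inverts the traversal: instead of looking each document term up in the sentiment dict in a single accumulating pass, it builds a frequency counter of the document and then iterates over the dictionary's entries, adding count*value to the score and the count to the positive/negative tallies.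
import Mathlib
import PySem

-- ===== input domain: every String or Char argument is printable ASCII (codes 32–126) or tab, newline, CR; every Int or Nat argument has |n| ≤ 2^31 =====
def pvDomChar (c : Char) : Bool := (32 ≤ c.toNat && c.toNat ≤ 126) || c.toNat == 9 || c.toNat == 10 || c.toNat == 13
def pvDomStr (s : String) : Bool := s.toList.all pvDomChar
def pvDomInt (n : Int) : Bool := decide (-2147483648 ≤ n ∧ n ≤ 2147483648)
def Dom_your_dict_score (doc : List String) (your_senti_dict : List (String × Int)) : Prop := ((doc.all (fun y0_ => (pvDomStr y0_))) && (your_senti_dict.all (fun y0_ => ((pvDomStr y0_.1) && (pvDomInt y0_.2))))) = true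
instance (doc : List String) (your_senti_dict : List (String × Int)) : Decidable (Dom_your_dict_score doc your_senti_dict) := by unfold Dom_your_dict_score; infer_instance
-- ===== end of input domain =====

-- B inverts the traversal (builds a frequency counter of the document, then walks the dict's entries); same results, 'alternative' objective.
-- ===== PORT A =====
def your_dict_score (doc : List String) (your_senti_dict : List (String × Int)) : Int × Int × Int :=
  if doc.length = 0 then (0, 0, 0)
  else
    doc.foldl (fun st term =>
      match (PySem.Dict.mk your_senti_dict).get? term with
      | some v =>
        let st := (st.1, st.2.1, st.2.2 + v)
        if v > 0 then (st.1 + 1, st.2.1, st.2.2)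
        else if v < 0 then (st.1, st.2.1 + 1, st.2.2)
        else st
      | none => st) (0, 0, 0)

-- ===== PORT B =====
def your_dict_score_alt (doc : List String) (your_senti_dict : List (String × Int)) : Int × Int × Int :=
  let counts := doc.foldl (fun d t => d.insert t (d.getD t 0 + 1)) PySem.Dict.empty
  (PySem.Dict.mk your_senti_dict).items.foldl (fun st kv =>
    let c := counts.getD kv.1 0
    let score := st.2.2 + c * kv.2
    if kv.2 > 0 then (st.1 + c, st.2.1, score)
    else if kv.2 < 0 then (st.1, st.2.1 + c, score)
    else (st.1, st.2.1, score)) (0, 0, 0)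

-- ===== PRECONDITION & SPEC =====
-- Pre_ excludes assoc lists with duplicate keys: a Python dict cannot contain them, so such lists
-- do not represent any input A accepts; on them the assoc-list representation is ambiguous
-- (A's port reads the first binding, B's dict iteration the overwritten one).
def Pre_your_dict_score (doc : List String) (your_senti_dict : List (String × Int)) : Prop :=
  (your_senti_dict.map Prod.fst).Nodup
instance (doc : List String) (your_senti_dict : List (String × Int)) : Decidable (Pre_your_dict_score doc your_senti_dict) := by unfold Pre_your_dict_score; infer_instance

def pvWitness_your_dict_score : List String × (List (String × Int)) :=
  (["good", "bad", "good", "meh"], [("good", 2), ("bad", -1), ("meh", 0)])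

def Spec_your_dict_score (doc : List String) (your_senti_dict : List (String × Int)) (out : Int × Int × Int) : Prop := out = your_dict_score_alt doc your_senti_dict
instance (doc : List String) (your_senti_dict : List (String × Int)) (out : Int × Int × Int) : Decidable (Spec_your_dict_score doc your_senti_dict out) := by unfold Spec_your_dict_score; infer_instance

-- ===== CLAIM (what is proved, stated in full; the proofs are below) =====
def Claim_equal_your_dict_score : Prop := ∀ (doc : List String) (your_senti_dict : List (String × Int)), Dom_your_dict_score doc your_senti_dict → Pre_your_dict_score doc your_senti_dict → Spec_your_dict_score doc your_senti_dict (your_dict_score doc your_senti_dict)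

-- ===== LEMMAS AND PROOFS =====

-- per-occurrence contribution of one document term, per component (f = the value's weight)
def pvHit (ys : List (String × Int)) (f : Int → Int) (t : String) : Int :=
  match (PySem.Dict.mk ys).get? t with
  | some v => f v
  | none => 0

-- A's fold accumulates the per-occurrence contributions
lemma foldA_eq (ys : List (String × Int)) (doc : List String) (p n s : Int) :
    doc.foldl (fun st term =>
      match (PySem.Dict.mk ys).get? term with
      | some v =>
        let st := (st.1, st.2.1, st.2.2 + v)
        if v > 0 then (st.1 + 1, st.2.1, st.2.2)
        else if v < 0 then (st.1, st.2.1 + 1, st.2.2)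
        else st
      | none => st) (p, n, s) =
    (p + (doc.map (pvHit ys (fun v => if v > 0 then 1 else 0))).sum,
     n + (doc.map (pvHit ys (fun v => if v < 0 then 1 else 0))).sum,
     s + (doc.map (pvHit ys id)).sum) := by
  induction doc generalizing p n s with
  | nil => simp
  | cons t rest ih =>
    simp only [List.foldl_cons, List.map_cons, List.sum_cons, pvHit]
    cases h : (PySem.Dict.mk ys).get? t with
    | none => simp [ih]
    | some v =>
      by_cases hp : v > 0
      · have hn : ¬ v < 0 := by omega
        simp [hp, hn, ih, Prod.ext_iff]
        omega
      · by_cases hn : v < 0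
        · simp [hp, hn, ih, Prod.ext_iff]
          omega
        · simp [hp, hn, ih, Prod.ext_iff]
          omega

-- B's fold accumulates count-weighted contributions per dict entry
lemma foldB_eq (l : List (String × Int)) (counts : PySem.Dict String Int)
    (p n s : Int) :
    l.foldl (fun st kv =>
      let c := counts.getD kv.1 0
      let score := st.2.2 + c * kv.2
      if kv.2 > 0 then (st.1 + c, st.2.1, score)
      else if kv.2 < 0 then (st.1, st.2.1 + c, score)
      else (st.1, st.2.1, score)) (p, n, s) =
    (p + (l.map (fun kv => counts.getD kv.1 0 * (if kv.2 > 0 then 1 else 0))).sum,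
     n + (l.map (fun kv => counts.getD kv.1 0 * (if kv.2 < 0 then 1 else 0))).sum,
     s + (l.map (fun kv => counts.getD kv.1 0 * kv.2)).sum) := by
  induction l generalizing p n s with
  | nil => simp
  | cons kv rest ih =>
    simp only [List.foldl_cons, List.map_cons, List.sum_cons]
    by_cases hp : kv.2 > 0
    · have hn : ¬ kv.2 < 0 := by omega
      simp [hp, hn, ih, Prod.ext_iff]
      and_intros <;> ring
    · by_cases hn : kv.2 < 0
      · simp [hp, hn, ih, Prod.ext_iff]
        and_intros <;> ring
      · simp [hp, hn, ih, Prod.ext_iff]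
        and_intros <;> ring

-- a key absent from the assoc list contributes nothing
lemma sum_ite_key_zero (l : List (String × Int)) (t : String) (f : Int → Int)
    (h : t ∉ l.map Prod.fst) :
    (l.map (fun kv => if kv.1 = t then f kv.2 else 0)).sum = 0 := by
  induction l with
  | nil => simp
  | cons kv rest ih =>
    simp only [List.map_cons, List.mem_cons, not_or] at h
    have hne : kv.1 ≠ t := fun hh => h.1 hh.symm
    simp [List.sum_cons, hne, ih h.2]

-- with Nodup keys, exactly the matching entry contributes
lemma sum_ite_key (l : List (String × Int)) (hnd : (l.map Prod.fst).Nodup) (t : String)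
    (f : Int → Int) :
    (l.map (fun kv => if kv.1 = t then f kv.2 else 0)).sum = pvHit l f t := by
  induction l with
  | nil => simp [pvHit, PySem.Dict.get?]
  | cons kv rest ih =>
    obtain ⟨k, v⟩ := kv
    simp only [List.map_cons, List.nodup_cons] at hnd
    simp only [List.map_cons, List.sum_cons, pvHit, PySem.Dict.get?_mk_cons]
    by_cases he : k = t
    · simp [he, sum_ite_key_zero rest t f (he ▸ hnd.1)]
    · have hb : (k == t) = false := by simp [he]
      simp only [hb, if_neg he, Bool.false_eq_true, if_false, zero_add]
      simpa [pvHit] using ih hnd.2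

-- bridge: per-occurrence sum over the document = count-weighted sum over the dict entries
lemma bridge (doc : List String) (ys : List (String × Int))
    (hnd : (ys.map Prod.fst).Nodup) (f : Int → Int) :
    (doc.map (pvHit ys f)).sum =
    (ys.map (fun kv => (doc.count kv.1 : Int) * f kv.2)).sum := by
  induction doc with
  | nil => simp
  | cons t rest ih =>
    simp only [List.map_cons, List.sum_cons, ih]
    have hcount : ∀ kv : String × Int,
        ((t :: rest).count kv.1 : Int) * f kv.2 =
        (rest.count kv.1 : Int) * f kv.2 + (if kv.1 = t then f kv.2 else 0) := by
      intro kv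
      obtain ⟨k, v⟩ := kv
      dsimp only
      rcases eq_or_ne k t with he | he
      · subst he; rw [if_pos rfl, List.count_cons_self]; push_cast; ring
      · rw [List.count_cons_of_ne (Ne.symm he), if_neg he, add_zero]
    calc pvHit ys f t + (ys.map (fun kv => (rest.count kv.1 : Int) * f kv.2)).sum
        = (ys.map (fun kv => (rest.count kv.1 : Int) * f kv.2)).sum
          + (ys.map (fun kv => if kv.1 = t then f kv.2 else 0)).sum := by
            rw [sum_ite_key ys hnd t f]; ring
      _ = (ys.map (fun kv => ((t :: rest).count kv.1 : Int) * f kv.2)).sum := by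
            rw [List.map_congr_left (fun kv _ => hcount kv), PySem.List.sum_map_add_int]

-- ===== VERDICT (by name: the statement is the Claim_ definition above) =====
theorem your_dict_score_spec : Claim_equal_your_dict_score := by
  intro doc ys _ hnd
  unfold Spec_your_dict_score your_dict_score your_dict_score_alt
  have hcounts : ∀ t, (doc.foldl (fun d t => d.insert t (d.getD t 0 + 1))
      PySem.Dict.empty).getD t 0 = (doc.count t : Int) := by
    intro t
    rw [PySem.Dict.getD_foldl_insert_add_one doc PySem.Dict.empty t]
    simp [PySem.Dict.getD_empty]
  rw [foldB_eq]
  have hrw : ∀ f : Int → Int,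
      ys.map (fun kv =>
        (doc.foldl (fun d t => d.insert t (d.getD t 0 + 1)) PySem.Dict.empty).getD kv.1 0 * f kv.2)
      = ys.map (fun kv => (doc.count kv.1 : Int) * f kv.2) := by
    intro f
    exact List.map_congr_left (fun kv _ => by rw [hcounts])
  split
  · next h =>
    have : doc = [] := List.length_eq_zero_iff.mp h
    subst this
    simp
  · rw [foldA_eq]
    have h1 := bridge doc ys hnd (fun v => if v > 0 then 1 else 0)
    have h2 := bridge doc ys hnd (fun v => if v < 0 then 1 else 0)
    have h3 := bridge doc ys hnd id
    simp only [Prod.ext_iff, zero_add]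
    refine ⟨?_, ?_, ?_⟩
    · rw [h1]; exact (congrArg List.sum (hrw (fun v => if v > 0 then 1 else 0))).symm
    · rw [h2]; exact (congrArg List.sum (hrw (fun v => if v < 0 then 1 else 0))).symm
    · rw [h3]; exact (congrArg List.sum (hrw id)).symm
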